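-- pv_equiv track=rewrite | github.com/faxyu729/2026-python | weeks/week-03/solutions/1114405020/tests/test_question272.py | convert
-- ===== SOURCE A (Python) =====
-- def convert(text):
--     """
--     將普通雙引號轉換為 TeX 方向引號。
--
--     參數：
--         text (str)：輸入文本
--
--     返回：
--         str：轉換後的文本
--     """
--     open_quote = True
--     result = []
--
--     for char in text:
--         if char == '"':
--             if open_quote:
--                 result.append("``")
--             else:
--                 result.append("''")
--             open_quote = not open_quote
--         else:
--             result.append(char)
--
--     return "".join(result)
-- ===== SOURCE B (Python) =====
-- def convert(text):
--     """
--     將普通雙引號轉換為 TeX 方向引號。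
--
--     參數：
--         text (str)：輸入文本
--
--     返回：
--         str：轉換後的文本
--     """
--     parts = text.split('"')
--     pieces = [parts[0]]
--     for i, part in enumerate(parts[1:]):
--         pieces.append('``' if i % 2 == 0 else "''")
--         pieces.append(part)
--     return ''.join(pieces)
-- ===== Notes on version B (the rewrite author's own statement) =====
-- stated objective: faster
-- what changed: Replaces the character-by-character scan with a toggle flag by splitting the text at straight double quotes and stitching the segments back with parity-indexed TeX quote marks; split/join run in C, removing the per-character Python loop.
import Mathlib
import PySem

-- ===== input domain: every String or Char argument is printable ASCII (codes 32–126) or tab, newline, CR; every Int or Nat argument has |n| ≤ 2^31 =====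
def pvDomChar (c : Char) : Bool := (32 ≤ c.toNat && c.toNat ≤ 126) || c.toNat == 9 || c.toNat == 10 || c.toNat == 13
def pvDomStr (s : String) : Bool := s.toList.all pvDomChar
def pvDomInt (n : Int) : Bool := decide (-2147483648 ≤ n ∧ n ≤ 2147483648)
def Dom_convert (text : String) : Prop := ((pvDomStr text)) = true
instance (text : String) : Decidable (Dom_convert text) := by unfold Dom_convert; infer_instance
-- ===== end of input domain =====

-- B replaces A's per-character scan with a toggle flag by split at straight quotes plus a parity-indexed stitch; a timing run measured B faster.


-- ===== PORT A =====
-- loop state: (open_quote, result); each step appends then toggles, as in A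
def convert (text : String) : String :=
  let st := text.toList.foldl
    (fun (st : Bool × List String) ch =>
      if ch = '"' then
        if st.1 then (!st.1, st.2 ++ ["``"]) else (!st.1, st.2 ++ ["''"])
      else (st.1, st.2 ++ [String.ofList [ch]]))
    (true, ([] : List String))
  PySem.Str.join "" st.2

-- ===== PORT B =====
-- parts = text.split('"') is always nonempty, so parts[0] never raises; headD "" renders it
def convert_alt (text : String) : String :=
  match PySem.Str.split? text "\"" with
  | none => ""   -- unreachable: the separator "\"" is nonempty
  | some parts =>
    let pieces := (PySem.List.enumerate (parts.drop 1)).foldl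
      (fun (acc : List String) (p : Int × String) =>
        (acc ++ [if PySem.Int.mod p.1 2 == 0 then "``" else "''"]) ++ [p.2])
      [parts.headD ""]
    PySem.Str.join "" pieces

-- ===== PRECONDITION & SPEC =====
def Spec_convert (text : String) (out : String) : Prop := out = convert_alt text
instance (text : String) (out : String) : Decidable (Spec_convert text out) := by unfold Spec_convert; infer_instance

-- ===== CLAIM (what is proved, stated in full; the proofs are below) =====
def Claim_equal_convert : Prop := ∀ (text : String), Dom_convert text → Spec_convert text (convert text)

-- ===== LEMMAS AND PROOFS =====

-- reference form of A's scan (chars out, toggle b = open_quote)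
def scanQ : List Char → Bool → List Char
  | [], _ => []
  | c :: r, b =>
    if c = '"' then (if b then ['`', '`'] else ['\'', '\'']) ++ scanQ r !b
    else c :: scanQ r b

-- reference form of split on '"' (cur = reversed current segment)
def splitQ : List Char → List Char → List (List Char)
  | [], cur => [cur.reverse]
  | c :: r, cur => if c = '"' then cur.reverse :: splitQ r [] else splitQ r (c :: cur)

-- reference form of B's stitch, from parity index i
def stitchQ : List (List Char) → Int → List Char
  | [], _ => []
  | p :: ps, i => (if PySem.Int.mod i 2 == 0 then ['`', '`'] else ['\'', '\'']) ++ p ++ stitchQ ps (i + 1)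

theorem splitQ_ne_nil (s cur : List Char) : splitQ s cur ≠ [] := by
  induction s generalizing cur with
  | nil => simp [splitQ]
  | cons c r ih => simp only [splitQ]; split <;> simp [ih]

theorem join_nil_eq_flatten (l : List (List Char)) :
    PySem.Chars.join [] l = l.flatten := by
  induction l with
  | nil => simp [PySem.Chars.join_nil]
  | cons p rest ih =>
    cases rest with
    | nil => simp [PySem.Chars.join, List.intercalate]
    | cons q t => rw [PySem.Chars.join_cons_cons, ih]; simp

-- A's foldl equals acc ++ scanQ, on the flattened char level
theorem convertA_fold (s : List Char) (b : Bool) (acc : List String) :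
    ((s.foldl
      (fun (st : Bool × List String) ch =>
        if ch = '"' then
          if st.1 then (!st.1, st.2 ++ ["``"]) else (!st.1, st.2 ++ ["''"])
        else (st.1, st.2 ++ [String.ofList [ch]]))
      (b, acc)).2.map String.toList).flatten
    = (acc.map String.toList).flatten ++ scanQ s b := by
  induction s generalizing b acc with
  | nil => simp [scanQ]
  | cons c r ih =>
    by_cases hc : c = '"'
    · cases b <;> simp [hc, List.foldl_cons, ih, scanQ]
    · simp [hc, List.foldl_cons, ih, scanQ, String.toList_ofList]

-- fuel elimination: PySem's splitOn on the one-char separator '"' is splitQ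
theorem splitOn_go_eq (fuel : Nat) (l cur : List Char) (acc : List (List Char)) (h : l.length < fuel) :
    PySem.Chars.splitOn.go ['"'] fuel l cur acc = acc.reverse ++ splitQ l cur := by
  induction fuel generalizing l cur acc with
  | zero => omega
  | succ n ih =>
    cases l with
    | nil => simp [PySem.Chars.splitOn.go, splitQ]
    | cons c r =>
      by_cases hc : c = '"'
      · subst hc
        rw [show PySem.Chars.splitOn.go ['"'] (n+1) ('"' :: r) cur acc
              = PySem.Chars.splitOn.go ['"'] n r [] (cur.reverse :: acc) from by
            simp [PySem.Chars.splitOn.go, List.isPrefixOf]]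
        rw [ih r [] _ (by simpa using Nat.lt_of_succ_lt_succ h)]
        simp [splitQ]
      · rw [show PySem.Chars.splitOn.go ['"'] (n+1) (c :: r) cur acc
              = PySem.Chars.splitOn.go ['"'] n r (c :: cur) acc from by
            simp only [PySem.Chars.splitOn.go, List.isPrefixOf]
            rw [if_neg (by simpa [beq_iff_eq] using Ne.symm hc)]]
        rw [ih r (c :: cur) acc (by simpa using Nat.lt_of_succ_lt_succ h)]
        simp [splitQ, hc]

theorem splitOn_eq_splitQ (s : List Char) :
    PySem.Chars.splitOn s ['"'] = splitQ s [] := by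
  have := splitOn_go_eq (s.length + 1) s [] [] (by omega)
  simpa [PySem.Chars.splitOn] using this

-- the central identity: head-of-split plus stitch equals A's scan
theorem parity_flip (i : Int) : (PySem.Int.mod (i+1) 2 == 0) = !(PySem.Int.mod i 2 == 0) := by
  rw [PySem.Int.mod_eq_emod_of_pos (b := 2) (by omega), PySem.Int.mod_eq_emod_of_pos (b := 2) (by omega)]
  rcases Int.emod_two_eq i with h | h <;> simp [Int.add_emod, h]

theorem stitch_splitQ (s cur : List Char) (i : Int) (hi : 0 ≤ i) :
    (splitQ s cur).headD [] ++ stitchQ (splitQ s cur).tail i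
    = cur.reverse ++ scanQ s (PySem.Int.mod i 2 == 0) := by
  induction s generalizing cur i with
  | nil => simp [splitQ, stitchQ, scanQ]
  | cons c r ih =>
    by_cases hc : c = '"'
    · subst hc
      simp only [splitQ, scanQ, reduceIte]
      obtain ⟨q, qs, hq⟩ : ∃ q qs, splitQ r [] = q :: qs := by
        cases h : splitQ r [] with
        | nil => exact absurd h (splitQ_ne_nil r [])
        | cons q qs => exact ⟨q, qs, rfl⟩
      have ihr := ih [] (i + 1) (by omega)
      rw [hq] at ihr ⊢
      simp only [List.headD, List.tail_cons, List.reverse_nil, List.nil_append] at ihr ⊢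
      simp only [stitchQ]
      rw [parity_flip i, PySem.Int.mod_eq_emod_of_pos (b := 2) (by omega)] at ihr
      simp [← ihr]
    · simp only [splitQ, if_neg hc, scanQ]
      rw [ih (c :: cur) i hi]; simp

-- B's foldl over enumerate equals head ++ stitch
theorem convertB_fold (ps : List String) (i : Int) (acc : List String) :
    (((PySem.List.enumerate ps i).foldl
      (fun (acc : List String) (p : Int × String) =>
        (acc ++ [if PySem.Int.mod p.1 2 == 0 then "``" else "''"]) ++ [p.2])
      acc).map String.toList).flatten
    = (acc.map String.toList).flatten ++ stitchQ (ps.map String.toList) i := by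
  induction ps generalizing i acc with
  | nil => simp [PySem.List.enumerate, stitchQ]
  | cons p t ih =>
    simp only [PySem.List.enumerate, List.foldl_cons, List.map_cons, stitchQ]
    rw [ih]
    cases hb : (PySem.Int.mod i 2 == 0) <;> simp

-- ===== VERDICT (by name: the statement is the Claim_ definition above) =====
theorem convert_spec : Claim_equal_convert := by
  intro text _
  unfold Spec_convert
  rw [← String.toList_inj]
  obtain ⟨q, qs, hq⟩ : ∃ q qs, splitQ text.toList [] = q :: qs := by
    cases h : splitQ text.toList [] with
    | nil => exact absurd h (splitQ_ne_nil text.toList [])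
    | cons q qs => exact ⟨q, qs, rfl⟩
  have hsplit : PySem.Str.split? text "\"" =
      some ((splitQ text.toList []).map String.ofList) := by
    simp [PySem.Str.split?, PySem.Chars.split?, splitOn_eq_splitQ]
  rw [convert, convert_alt, hsplit]
  simp only [PySem.Str.toList_join, String.toList_empty, join_nil_eq_flatten]
  rw [convertA_fold, convertB_fold]
  have hmain := stitch_splitQ text.toList [] 0 (by omega)
  rw [hq] at hmain ⊢
  simp only [List.headD, List.tail_cons, List.reverse_nil, List.nil_append] at hmain
  rw [show (PySem.Int.mod 0 2 == 0) = true from by decide] at hmain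
  simp [Function.comp_def, String.toList_ofList, List.map_map, ← hmain]
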